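-- pv_equiv track=rewrite | github.com/me-ahnafnasim/python_problems | cursorAI/btree/sum_of_odd.py | sum_odd_nodes
-- ===== SOURCE A (Python) =====
-- def sum_odd_nodes(tree, root):
--     if root is None:
--         return 0
--
--     node = tree.get(root)
--     if node is None:
--         return 0
--
--     current_value = root if type(root) is int else 0
--     left_child = node["L"]
--     right_child = node["R"]
--
--     current_sum = current_value if current_value % 2 !=0 else 0
--
--     return current_sum + sum_odd_nodes(tree, left_child) + sum_odd_nodes(tree, right_child )
-- ===== SOURCE B (Python) =====
-- def sum_odd_nodes(tree, root):
--     total = 0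
--     frontier = [root]
--     while frontier:
--         next_frontier = []
--         for key in frontier:
--             if key is None:
--                 continue
--             node = tree.get(key)
--             if node is None:
--                 continue
--             value = key if type(key) is int else 0
--             if value % 2 != 0:
--                 total += value
--             next_frontier.append(node["L"])
--             next_frontier.append(node["R"])
--         frontier = next_frontier
--     return total
-- ===== Notes on version B (the rewrite author's own statement) =====
-- stated objective: alternative
-- what changed: Replaces A's top-down recursion with an iterative breadth-first (level-by-level) traversal that keeps a frontier list of pending keys and a running total.
import Mathlib
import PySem

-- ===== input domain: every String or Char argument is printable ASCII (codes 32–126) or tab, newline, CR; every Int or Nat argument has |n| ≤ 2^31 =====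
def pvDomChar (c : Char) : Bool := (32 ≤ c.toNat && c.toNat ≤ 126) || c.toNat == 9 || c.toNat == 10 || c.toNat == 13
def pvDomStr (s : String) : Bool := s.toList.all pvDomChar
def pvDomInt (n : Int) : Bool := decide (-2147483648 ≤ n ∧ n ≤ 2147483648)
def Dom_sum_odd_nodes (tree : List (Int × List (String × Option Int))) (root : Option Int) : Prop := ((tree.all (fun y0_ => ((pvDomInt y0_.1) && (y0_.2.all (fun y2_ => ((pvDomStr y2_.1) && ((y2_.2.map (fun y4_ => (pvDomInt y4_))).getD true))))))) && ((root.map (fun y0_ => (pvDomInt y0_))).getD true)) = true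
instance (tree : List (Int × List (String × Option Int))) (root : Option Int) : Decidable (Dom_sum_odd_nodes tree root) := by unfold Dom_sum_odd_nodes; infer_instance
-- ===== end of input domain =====

-- B replaces A's top-down recursion by an iterative breadth-first, level-by-level traversal
-- (frontier list + running total); same return value on Pre_ (objective: alternative decomposition).


-- ===== PORT A =====
-- A's recursive descent, with a fuel bound tree.length+1 that only makes it total:
-- under Pre_ (the part of the child graph reachable from root is well-formed and acyclic)
-- every chain of successful lookups has distinct keys, so its length is at most tree.length
-- and the fuel guard is never reached.
-- root is typed Option Int, so Python's `root if type(root) is int else 0` is just the key itself.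
def sum_odd_nodes_go (tree : List (Int × List (String × Option Int))) :
    Nat → Option Int → Int
  | _, none => 0
  | 0, some _ => 0          -- fuel guard (unreachable under Pre_)
  | f + 1, some r =>
    match (PySem.Dict.mk tree).get? r with
    | none => 0
    | some node =>
      match (PySem.Dict.mk node).get? "L", (PySem.Dict.mk node).get? "R" with
      | some l, some rr =>
        (if PySem.Int.mod r 2 ≠ 0 then r else 0)
          + sum_odd_nodes_go tree f l + sum_odd_nodes_go tree f rr
      | _, _ => 0           -- Python raises KeyError here; excluded by Pre_

def sum_odd_nodes (tree : List (Int × List (String × Option Int))) (root : Option Int) : Int :=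
  sum_odd_nodes_go tree (tree.length + 1) root

-- ===== PORT B =====
-- one frontier key of B's inner for-loop: state = (total so far, next_frontier so far)
def sum_odd_nodes_step (tree : List (Int × List (String × Option Int)))
    (st : Int × List (Option Int)) (key : Option Int) : Int × List (Option Int) :=
  match key with
  | none => st
  | some k =>
    match (PySem.Dict.mk tree).get? k with
    | none => st
    | some node =>
      match (PySem.Dict.mk node).get? "L", (PySem.Dict.mk node).get? "R" with
      | some l, some r =>
        ((if PySem.Int.mod k 2 ≠ 0 then st.1 + k else st.1), st.2 ++ [l, r])
      | _, _ => st          -- Python raises KeyError here; excluded by Pre_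

-- B's while-loop over levels, with the same fuel bound making it total
def sum_odd_nodes_levels (tree : List (Int × List (String × Option Int))) :
    Nat → Int → List (Option Int) → Int
  | 0, total, _ => total    -- fuel guard (unreachable under Pre_)
  | _ + 1, total, [] => total
  | f + 1, total, k :: ks =>
    let s := (k :: ks).foldl (sum_odd_nodes_step tree) (total, [])
    sum_odd_nodes_levels tree f s.1 s.2

def sum_odd_nodes_alt (tree : List (Int × List (String × Option Int))) (root : Option Int) : Int :=
  sum_odd_nodes_levels tree (tree.length + 1) 0 [root]

-- ===== PRECONDITION & SPEC =====
-- helpers for Pre_: Pre_ is a property of the input's child graph (which keys are reachable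
-- from root, whether their entries are well-formed, whether a reachable cycle exists),
-- decided by a standard DFS over the finite key set — neither port's algorithm.
def pvKids (tree : List (Int × List (String × Option Int))) (k : Int) : List Int :=
  match (PySem.Dict.mk tree).get? k with
  | none => []
  | some node =>
    (((PySem.Dict.mk node).get? "L").getD none).toList
      ++ (((PySem.Dict.mk node).get? "R").getD none).toList

-- standard DFS over the finite key set; the Nat argument is an explicit step bound
-- (each step strictly decreases 3*|unvisited keys| + |stack|, which 3*tree.length + 2
-- bounds for both start stacks below, so the search always finishes before it runs out);
-- it only makes the recursion structural so that `decide` can evaluate Pre_.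
def pvDFS (tree : List (Int × List (String × Option Int))) :
    Nat → List Int → List Int → List Int
  | 0, visited, _ => visited
  | fuel + 1, visited, stack =>
    match stack with
    | [] => visited
    | k :: stk =>
      if k ∈ visited then pvDFS tree fuel visited stk
      else pvDFS tree fuel (k :: visited) (pvKids tree k ++ stk)

-- keys reachable from root following child links (missing "L"/"R" contribute no edge)
def pvReach (tree : List (Int × List (String × Option Int))) (root : Option Int) : List Int :=
  pvDFS tree (3 * tree.length + 2) [] root.toList

-- a key's own node entry, if any, carries both an "L" and an "R" field
def pvGoodNode (tree : List (Int × List (String × Option Int))) (k : Int) : Bool :=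
  match (PySem.Dict.mk tree).get? k with
  | none => true
  | some node =>
    ((PySem.Dict.mk node).get? "L").isSome && ((PySem.Dict.mk node).get? "R").isSome

-- Pre_ excludes exactly the inputs on which Python A raises: a KeyError when a node reachable
-- from root lacks an "L" or "R" entry, or unbounded recursion when a cycle of child links is
-- reachable from root. Only the reachable part of the dict is constrained; unreachable entries
-- may be arbitrary, and on every input admitted here A returns normally.
def Pre_sum_odd_nodes (tree : List (Int × List (String × Option Int))) (root : Option Int) : Prop :=
  ∀ k ∈ pvReach tree root,
    pvGoodNode tree k = true ∧ k ∉ pvDFS tree (3 * tree.length + 2) [] (pvKids tree k)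
instance (tree : List (Int × List (String × Option Int))) (root : Option Int) : Decidable (Pre_sum_odd_nodes tree root) := by unfold Pre_sum_odd_nodes; infer_instance

def pvWitness_sum_odd_nodes : (List (Int × List (String × Option Int))) × Option Int :=
  ([(3, [("L", some 2), ("R", none)]), (2, [("L", none), ("R", some 1)]), (1, [("L", none), ("R", none)])], some 3)

def Spec_sum_odd_nodes (tree : List (Int × List (String × Option Int))) (root : Option Int) (out : Int) : Prop := out = sum_odd_nodes_alt tree root
instance (tree : List (Int × List (String × Option Int))) (root : Option Int) (out : Int) : Decidable (Spec_sum_odd_nodes tree root out) := by unfold Spec_sum_odd_nodes; infer_instance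

-- ===== CLAIM (what is proved, stated in full; the proofs are below) =====
def Claim_equal_sum_odd_nodes : Prop := ∀ (tree : List (Int × List (String × Option Int))) (root : Option Int), Dom_sum_odd_nodes tree root → Pre_sum_odd_nodes tree root → Spec_sum_odd_nodes tree root (sum_odd_nodes tree root)

-- ===== LEMMAS AND PROOFS =====
-- total odd-sum A assigns to a whole frontier at a given fuel
def sum_odd_nodes_S (tree : List (Int × List (String × Option Int))) (f : Nat)
    (l : List (Option Int)) : Int :=
  (l.map (sum_odd_nodes_go tree f)).sum

theorem sum_odd_nodes_go_zero (tree : List (Int × List (String × Option Int)))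
    (k : Option Int) : sum_odd_nodes_go tree 0 k = 0 := by
  cases k <;> rfl

-- the inner for-loop of B: running total + pending frontier value is preserved per key
theorem sum_odd_nodes_fold_spec (tree : List (Int × List (String × Option Int))) (f : Nat) :
    ∀ (frontier : List (Option Int)) (total : Int) (nxt : List (Option Int)),
      (frontier.foldl (sum_odd_nodes_step tree) (total, nxt)).1
        + sum_odd_nodes_S tree f (frontier.foldl (sum_odd_nodes_step tree) (total, nxt)).2
      = total + sum_odd_nodes_S tree f nxt + sum_odd_nodes_S tree (f + 1) frontier := by
  intro frontier
  induction frontier with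
  | nil => intro total nxt; simp [sum_odd_nodes_S]
  | cons key ks ih =>
    intro total nxt
    simp only [List.foldl_cons]
    rw [ih]
    cases key with
    | none =>
      simp [sum_odd_nodes_step, sum_odd_nodes_S, sum_odd_nodes_go]
    | some k =>
      simp only [sum_odd_nodes_step]
      cases hL : (PySem.Dict.mk tree).get? k with
      | none =>
        simp [sum_odd_nodes_S, sum_odd_nodes_go, hL]
      | some node =>
        cases hl : (PySem.Dict.mk node).get? "L" with
        | none => simp [sum_odd_nodes_S, sum_odd_nodes_go, hL, hl]
        | some l =>
          cases hr : (PySem.Dict.mk node).get? "R" with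
          | none => simp [sum_odd_nodes_S, sum_odd_nodes_go, hL, hl, hr]
          | some r =>
            simp only [hl, hr]
            rw [show PySem.Int.mod k 2 = k % 2 from PySem.Int.mod_eq_emod_of_pos (by norm_num)]
            split_ifs with hc <;>
              simp [sum_odd_nodes_S, sum_odd_nodes_go, hL, hl, hr] <;>
              split_ifs <;> omega

-- B's level loop computes the recursive sum of every key in the frontier, at equal fuel
theorem sum_odd_nodes_levels_spec (tree : List (Int × List (String × Option Int))) :
    ∀ (f : Nat) (total : Int) (frontier : List (Option Int)),
      sum_odd_nodes_levels tree f total frontier = total + sum_odd_nodes_S tree f frontier := by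
  intro f
  induction f with
  | zero =>
    intro total frontier
    simp [sum_odd_nodes_levels, sum_odd_nodes_S]
    induction frontier with
    | nil => simp
    | cons k ks ih => simp [sum_odd_nodes_go_zero, ih]
  | succ f ih =>
    intro total frontier
    cases frontier with
    | nil => simp [sum_odd_nodes_levels, sum_odd_nodes_S]
    | cons k ks =>
      show sum_odd_nodes_levels tree f _ _ = _
      rw [ih]
      have := sum_odd_nodes_fold_spec tree f (k :: ks) total []
      simp only [sum_odd_nodes_S, List.map_nil, List.sum_nil, add_zero] at this ⊢
      omega

-- ===== VERDICT (by name: the statement is the Claim_ definition above) =====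
theorem sum_odd_nodes_spec : Claim_equal_sum_odd_nodes := by
  intro tree root _ _
  unfold Spec_sum_odd_nodes sum_odd_nodes sum_odd_nodes_alt
  rw [sum_odd_nodes_levels_spec]
  simp [sum_odd_nodes_S]
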